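-- pv_equiv track=rewrite | github.com/a-canary/Conjecture | tests/test_statistical_validation.py | _group_by_approach
-- ===== SOURCE A (Python) =====
-- from typing import Any, Dict, List, Optional, Tuple
--
-- def _group_by_approach(
--
--     test_results: List[Dict[str, Any]],
--     approaches: List[str]
-- ) -> Dict[str, List[Dict[str, Any]]]:
--     """Group test results by approach"""
--
--     approach_data = {approach: [] for approach in approaches}
--
--     for result in test_results:
--         approach = result.get("approach", "")
--         if approach in approach_data:
--             approach_data[approach].append(result)
--
--     return approach_data
-- ===== SOURCE B (Python) =====
-- def _group_by_approach(test_results, approaches):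
--     """Group test results by approach: one filtering scan of the results per approach."""
--     return {
--         approach: [r for r in test_results if r.get("approach", "") == approach]
--         for approach in approaches
--     }
-- ===== Notes on version B (the rewrite author's own statement) =====
-- stated objective: simpler
-- what changed: B replaces A's single pass that buckets each result into a pre-seeded dict (membership test + in-place append) with a dict comprehension keyed by approach whose value is a filtering list comprehension over test_results, i.e. an outer loop over approaches with an inner scan of the results instead of one pass with a mutable accumulator.
import Mathlib
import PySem

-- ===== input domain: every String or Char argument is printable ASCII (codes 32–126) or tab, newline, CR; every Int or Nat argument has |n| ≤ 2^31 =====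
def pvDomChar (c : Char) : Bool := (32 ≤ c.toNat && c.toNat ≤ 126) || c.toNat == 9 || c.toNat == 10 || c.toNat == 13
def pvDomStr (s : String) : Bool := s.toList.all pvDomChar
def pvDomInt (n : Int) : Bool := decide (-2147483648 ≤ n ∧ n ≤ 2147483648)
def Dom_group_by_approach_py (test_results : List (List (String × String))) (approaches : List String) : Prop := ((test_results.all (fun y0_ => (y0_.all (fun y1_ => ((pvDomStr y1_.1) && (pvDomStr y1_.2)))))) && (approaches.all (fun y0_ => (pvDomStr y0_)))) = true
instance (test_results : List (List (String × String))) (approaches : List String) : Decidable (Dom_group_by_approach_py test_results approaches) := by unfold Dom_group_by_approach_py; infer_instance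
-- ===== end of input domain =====

-- ===== PORT A =====
-- B replaces A's single bucketing pass over a pre-seeded mutable dict with a dict
-- comprehension: one filtering scan of test_results per approach; same return value.

-- result.get("approach", "") on the result dict (built from its pair list as Python's dict() does)
def pvKey (r : List (String × String)) : String :=
  (PySem.Dict.ofList r).getD "approach" ""

-- approach_data = {approach: [] for approach in approaches}
def pvSeed (approaches : List String) : PySem.Dict String (List (List (String × String))) :=
  approaches.foldl (fun d a => d.insert a []) PySem.Dict.empty

-- for result in test_results: … if approach in approach_data: approach_data[approach].append(result)
def pvLoopA (test_results : List (List (String × String)))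
    (d : PySem.Dict String (List (List (String × String)))) :
    PySem.Dict String (List (List (String × String))) :=
  test_results.foldl
    (fun d r =>
      let ap := pvKey r
      if d.contains ap then d.modify ap [] (fun v => v ++ [r]) else d) d

def group_by_approach_py (test_results : List (List (String × String)))
    (approaches : List String) : List (String × List (List (String × String))) :=
  (pvLoopA test_results (pvSeed approaches)).items

-- ===== PORT B =====
-- {approach: [r for r in test_results if r.get("approach","") == approach] for approach in approaches}
-- (a dict comprehension keeps each key once, in first-occurrence order = PySem.Set.ofList;
--  the value for a duplicated key is recomputed identically, so first occurrence suffices)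
def group_by_approach_py_alt (test_results : List (List (String × String)))
    (approaches : List String) : List (String × List (List (String × String))) :=
  (PySem.Set.ofList approaches).map
    (fun a => (a, test_results.filter (fun r => pvKey r == a)))

-- ===== PRECONDITION & SPEC =====
def Spec_group_by_approach_py (test_results : List (List (String × String))) (approaches : List String) (out : List (String × List (List (String × String)))) : Prop := out = group_by_approach_py_alt test_results approaches
instance (test_results : List (List (String × String))) (approaches : List String) (out : List (String × List (List (String × String)))) : Decidable (Spec_group_by_approach_py test_results approaches out) := by unfold Spec_group_by_approach_py; infer_instance

-- ===== CLAIM (what is proved, stated in full; the proofs are below) =====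
def Claim_equal_group_by_approach_py : Prop := ∀ (test_results : List (List (String × String))) (approaches : List String), Dom_group_by_approach_py test_results approaches → Spec_group_by_approach_py test_results approaches (group_by_approach_py test_results approaches)

-- ===== LEMMAS AND PROOFS =====

theorem pvLoopA_keys (l : List (List (String × String)))
    (d : PySem.Dict String (List (List (String × String)))) :
    (pvLoopA l d).keys = d.keys := by
  induction l generalizing d with
  | nil => rfl
  | cons r l ih =>
      simp only [pvLoopA, List.foldl_cons]
      by_cases h : d.contains (pvKey r) = true
      · simp only [h, if_true]
        have := ih (d.modify (pvKey r) [] (fun v => v ++ [r]))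
        simp only [pvLoopA] at this
        rw [this, PySem.Dict.keys_modify]
        exact PySem.Dict.keys_insert_of_contains d _ h
      · simp only [Bool.not_eq_true] at h
        simp only [h, Bool.false_eq_true, if_false]
        exact ih d

theorem pvLoopA_getD (l : List (List (String × String)))
    (d : PySem.Dict String (List (List (String × String)))) (a : String)
    (ha : d.contains a = true) :
    (pvLoopA l d).getD a [] = d.getD a [] ++ l.filter (fun r => pvKey r == a) := by
  induction l generalizing d with
  | nil => simp [pvLoopA]
  | cons r l ih =>
      simp only [pvLoopA, List.foldl_cons, List.filter_cons] at *
      by_cases h : d.contains (pvKey r) = true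
      · simp only [h, if_true]
        have hc : (d.modify (pvKey r) [] (fun v => v ++ [r])).contains a = true := by
          rw [PySem.Dict.contains_modify]; simp [ha]
        rw [ih _ hc, PySem.Dict.getD_modify]
        by_cases hk : pvKey r = a
        · subst hk; simp
        · simp [hk, Ne.symm hk]
      · simp only [Bool.not_eq_true] at h
        have hk : pvKey r ≠ a := fun he => by rw [he, ha] at h; cases h
        simp only [h, Bool.false_eq_true, if_false]
        rw [ih d ha]
        simp [hk]

theorem pvSeed_keys (approaches : List String) :
    (pvSeed approaches).keys = PySem.Set.ofList approaches := by
  rw [pvSeed, PySem.Dict.keys_foldl_insert]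
  simp only [PySem.Dict.keys_empty]
  exact PySem.Set.update_nil_left approaches

theorem pvSeed_nodup (approaches : List String) : (pvSeed approaches).keys.Nodup :=
  PySem.Dict.nodup_keys_foldl_insert _ _ _ PySem.Dict.nodup_keys_empty

theorem pvSeed_getD (approaches : List String) (a : String) :
    (pvSeed approaches).getD a [] = [] := by
  have h : ∀ (l : List String) (d : PySem.Dict String (List (List (String × String)))),
      (∀ k, d.getD k [] = []) → (l.foldl (fun d a => d.insert a []) d).getD a [] = [] := by
    intro l
    induction l with
    | nil => intro d hd; exact hd a
    | cons x l ih =>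
        intro d hd
        simp only [List.foldl_cons]
        apply ih
        intro k
        rw [PySem.Dict.getD_insert]
        split_ifs with h
        · rfl
        · exact hd k
  exact h approaches PySem.Dict.empty (fun k => PySem.Dict.getD_empty ..)

-- ===== VERDICT (by name: the statement is the Claim_ definition above) =====
theorem group_by_approach_py_spec : Claim_equal_group_by_approach_py := by
  intro test_results approaches _
  unfold Spec_group_by_approach_py group_by_approach_py group_by_approach_py_alt
  have hkeys : (pvLoopA test_results (pvSeed approaches)).keys
      = PySem.Set.ofList approaches := by
    rw [pvLoopA_keys, pvSeed_keys]
  have hnd : (pvLoopA test_results (pvSeed approaches)).keys.Nodup := by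
    rw [pvLoopA_keys]; exact pvSeed_nodup approaches
  rw [PySem.Dict.items_eq_map_keys _ hnd ([] : List (List (String × String))), hkeys]
  apply List.map_congr_left
  intro a hmem
  have hca : (pvSeed approaches).contains a = true := by
    rw [PySem.Dict.contains_iff_mem_keys, pvSeed_keys]
    exact hmem
  rw [pvLoopA_getD _ _ _ hca, pvSeed_getD]
  simp
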